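-- pv_equiv track=rewrite | github.com/Cotorrra/Sr.Cotorre-discord-edition | src/p_cards/utils.py | customize_card
-- ===== SOURCE A (Python) =====
-- def customize_card(card: dict, deck_meta={}) -> dict:
--     """
--     Customizes a card with the given deck meta.
--
--     Args:
--         card (dict): A card dict
--         deck_meta (dict): A deck meta dict
--
--     Returns:
--         dict: A card dict
--     """
--     c = card.copy()
--     if card['code'] in ['09021', '09079', '09080'] and card['code'] in deck_meta:
--         card_meta = deck_meta[card['code']]
--         for upgrade_id, upgrade_info in card_meta.items():
--             # Here you can add the customization rules for each card when Needed
--                 if card['code'] == '09021' and upgrade_id == '0' and upgrade_info['xp'] == '1':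
--                     # Hunter's Armor: Enchanted
--                     c['real_slot'] = "Arcane"
--                 if card['code'] == '09079' and upgrade_id == '3' and upgrade_info['xp'] == '2':
--                     # Living Ink: Imbued Ink
--                     c['real_slot'] = "Arcane"
--                 if card['code'] == '09080' and upgrade_id == '5' and upgrade_info['xp'] == '2':
--                     # Summoned Servitor: Dominance
--                     if upgrade_info['info'] == '0':
--                         c['real_slot'] = "Arcane"
--                     elif upgrade_info['info'] == '1':
--                         c['real_slot'] = "Ally"
--     return c
-- ===== SOURCE B (Python) =====
-- # Data-driven: one generic first-match scan over a declarative rules table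
-- # (code, upgrade_id, required xp, required info or None, slot), instead of
-- # hard-coded per-code conditionals applied to every card_meta item.
-- RULES = [
--     ('09021', '0', '1', None, "Arcane"),   # Hunter's Armor: Enchanted
--     ('09079', '3', '2', None, "Arcane"),   # Living Ink: Imbued Ink
--     ('09080', '5', '2', '0', "Arcane"),    # Summoned Servitor: Dominance (arcane)
--     ('09080', '5', '2', '1', "Ally"),      # Summoned Servitor: Dominance (ally)
-- ]
--
--
-- def customize_card(card: dict, deck_meta={}) -> dict:
--     c = card.copy()
--     code = card['code']
--     for r_code, uid, xp, info, slot in RULES: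
--         if (code == r_code and code in deck_meta and uid in deck_meta[code]
--                 and deck_meta[code][uid]['xp'] == xp
--                 and (info is None or deck_meta[code][uid]['info'] == info)):
--             c['real_slot'] = slot
--             break
--     return c
-- ===== Notes on version B (the rewrite author's own statement) =====
-- stated objective: alternative
-- what changed: Replaces A's loop over all card_meta items with three hard-coded per-code conditionals per item by a generic first-match scan over a declarative rules table (code, upgrade_id, xp, info, slot): each rule is tested by one uniform predicate that looks the named upgrade entry up directly in deck_meta, and the first match sets real_slot.
import Mathlib
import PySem

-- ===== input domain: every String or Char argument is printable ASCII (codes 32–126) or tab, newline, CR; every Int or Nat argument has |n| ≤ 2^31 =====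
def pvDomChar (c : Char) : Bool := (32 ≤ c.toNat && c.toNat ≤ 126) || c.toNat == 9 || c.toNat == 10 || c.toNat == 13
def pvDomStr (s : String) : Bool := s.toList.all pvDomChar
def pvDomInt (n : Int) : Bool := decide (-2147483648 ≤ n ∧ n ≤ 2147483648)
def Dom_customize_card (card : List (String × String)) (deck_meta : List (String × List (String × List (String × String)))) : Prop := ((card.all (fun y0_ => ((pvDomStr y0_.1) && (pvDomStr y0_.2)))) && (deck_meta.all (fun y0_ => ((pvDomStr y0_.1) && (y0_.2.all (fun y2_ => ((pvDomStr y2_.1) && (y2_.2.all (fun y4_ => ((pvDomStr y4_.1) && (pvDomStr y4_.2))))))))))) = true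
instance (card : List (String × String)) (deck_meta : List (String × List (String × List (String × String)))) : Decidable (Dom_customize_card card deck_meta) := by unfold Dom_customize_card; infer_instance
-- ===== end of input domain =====

-- B replaces A's scan over all card_meta items (three hard-coded conditionals per item) by a
-- generic first-match scan over a declarative rules table; same return value.

-- ===== PORT A =====
-- Dicts are PySem.Dict over the given association lists; KeyError cases are excluded by Pre_
-- and the port returns the copy unchanged there.
def customize_card (card : List (String × String)) (deck_meta : List (String × List (String × List (String × String)))) : List (String × String) :=
  let c := PySem.Dict.mk card                       -- c = card.copy()
  match (PySem.Dict.mk card).get? "code" with       -- card['code'] (none = KeyError, outside Pre_)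
  | none => c.items
  | some code =>
    if (code = "09021" ∨ code = "09079" ∨ code = "09080") ∧ (PySem.Dict.mk deck_meta).contains code then
      let card_meta := ((PySem.Dict.mk deck_meta).get? code).getD []
      (card_meta.foldl (fun c p =>
        -- upgrade_info['xp'] / ['info'] read with default "" — only reached inside Pre_ when the key is present
        let c := if code = "09021" ∧ p.1 = "0" ∧ (PySem.Dict.mk p.2).getD "xp" "" = "1" then c.insert "real_slot" "Arcane" else c
        let c := if code = "09079" ∧ p.1 = "3" ∧ (PySem.Dict.mk p.2).getD "xp" "" = "2" then c.insert "real_slot" "Arcane" else c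
        if code = "09080" ∧ p.1 = "5" ∧ (PySem.Dict.mk p.2).getD "xp" "" = "2" then
          (if (PySem.Dict.mk p.2).getD "info" "" = "0" then c.insert "real_slot" "Arcane"
           else if (PySem.Dict.mk p.2).getD "info" "" = "1" then c.insert "real_slot" "Ally"
           else c)
        else c) c).items
    else c.items

-- ===== PORT B =====
-- the declarative rules table: (code, upgrade_id, required xp, required info or none, slot)
def customizeRulesB : List (String × String × String × Option String × String) :=
  [("09021", "0", "1", none, "Arcane"),
   ("09079", "3", "2", none, "Arcane"),
   ("09080", "5", "2", some "0", "Arcane"),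
   ("09080", "5", "2", some "1", "Ally")]

-- the for-loop with break: first matching rule sets real_slot and stops
def applyFirstRule (code : String) (deck : PySem.Dict String (List (String × List (String × String))))
    (c : PySem.Dict String String) :
    List (String × String × String × Option String × String) → PySem.Dict String String
  | [] => c
  | (rcode, uid, xp, info, slot) :: rest =>
    if (code == rcode && deck.contains code
        && (PySem.Dict.mk (deck.getD code [])).contains uid
        -- deck_meta[code][uid]['xp'] / ['info'] read with default "" — only reached inside Pre_ when present
        && ((PySem.Dict.mk ((PySem.Dict.mk (deck.getD code [])).getD uid [])).getD "xp" "" == xp)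
        && (match info with
            | none => true
            | some i => (PySem.Dict.mk ((PySem.Dict.mk (deck.getD code [])).getD uid [])).getD "info" "" == i))
    then c.insert "real_slot" slot
    else applyFirstRule code deck c rest

def customize_card_alt (card : List (String × String)) (deck_meta : List (String × List (String × List (String × String)))) : List (String × String) :=
  let c := PySem.Dict.mk card                       -- c = card.copy()
  match (PySem.Dict.mk card).get? "code" with       -- card['code'] (none = KeyError, outside Pre_)
  | none => c.items
  | some code => (applyFirstRule code (PySem.Dict.mk deck_meta) c customizeRulesB).items

-- ===== PRECONDITION & SPEC =====
-- Pre_ excludes (a) inputs where A raises KeyError: card without a 'code' key, or a matched upgrade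
-- entry lacking 'xp' (or lacking 'info' when the code is 09080 and its 'xp' is '2'); and (b) inputs
-- whose relevant card_meta association list has duplicate keys — those represent no Python dict
-- (Python collapses duplicates), so which entry A's loop visits there is accidental.
def preCheck_customize (card : List (String × String)) (deck_meta : List (String × List (String × List (String × String)))) : Bool :=
  match (PySem.Dict.mk card).get? "code" with
  | none => false
  | some code =>
    match (if code = "09021" then some ("0" : String) else if code = "09079" then some "3" else if code = "09080" then some "5" else none) with
    | none => true
    | some uid =>
      match (PySem.Dict.mk deck_meta).get? code with
      | none => true
      | some m =>
        decide ((m.map Prod.fst).Nodup) &&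
        (match (PySem.Dict.mk m).get? uid with
         | none => true
         | some u =>
           ((PySem.Dict.mk u).get? "xp").isSome &&
           (!(code == "09080" && (PySem.Dict.mk u).get? "xp" == some "2") || ((PySem.Dict.mk u).get? "info").isSome))

def Pre_customize_card (card : List (String × String)) (deck_meta : List (String × List (String × List (String × String)))) : Prop :=
  preCheck_customize card deck_meta = true
instance (card : List (String × String)) (deck_meta : List (String × List (String × List (String × String)))) : Decidable (Pre_customize_card card deck_meta) := by unfold Pre_customize_card; infer_instance

def pvWitness_customize_card : (List (String × String)) × (List (String × List (String × List (String × String)))) :=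
  ([("code", "09021")], [("09021", [("0", [("xp", "1")])])])

def Spec_customize_card (card : List (String × String)) (deck_meta : List (String × List (String × List (String × String)))) (out : List (String × String)) : Prop := out = customize_card_alt card deck_meta
instance (card : List (String × String)) (deck_meta : List (String × List (String × List (String × String)))) (out : List (String × String)) : Decidable (Spec_customize_card card deck_meta out) := by unfold Spec_customize_card; infer_instance

-- ===== CLAIM (what is proved, stated in full; the proofs are below) =====
def Claim_equal_customize_card : Prop := ∀ (card : List (String × String)) (deck_meta : List (String × List (String × List (String × String)))), Dom_customize_card card deck_meta → Pre_customize_card card deck_meta → Spec_customize_card card deck_meta (customize_card card deck_meta)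

-- ===== LEMMAS AND PROOFS =====

-- a fold that touches the accumulator only at key `uid` is the identity when `uid` is absent
lemma foldl_nokey {α β : Type} (uid : String) (g : α → β → β) :
    ∀ (m : List (String × α)), (∀ p ∈ m, p.1 ≠ uid) → ∀ c : β,
      m.foldl (fun c p => if p.1 = uid then g p.2 c else c) c = c := by
  intro m
  induction m with
  | nil => intro _ c; rfl
  | cons hd tl ih =>
    intro h c
    simp only [List.foldl_cons, if_neg (h hd (List.mem_cons_self))]
    exact ih (fun p hp => h p (List.mem_cons_of_mem _ hp)) c

-- with unique keys, such a fold is the direct first-match lookup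
lemma foldl_key {α β : Type} (uid : String) (g : α → β → β) :
    ∀ (m : List (String × α)), (m.map Prod.fst).Nodup → ∀ c : β,
      m.foldl (fun c p => if p.1 = uid then g p.2 c else c) c =
        (match (PySem.Dict.mk m).get? uid with | none => c | some u => g u c) := by
  intro m
  induction m with
  | nil => intro _ c; rfl
  | cons hd tl ih =>
    intro hnd c
    obtain ⟨k, v⟩ := hd
    simp only [List.map_cons, List.nodup_cons] at hnd
    rw [PySem.Dict.get?_mk_cons]
    by_cases hk : k = uid
    · subst hk
      simp only [List.foldl_cons, beq_self_eq_true, if_pos]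
      exact foldl_nokey k g tl (fun p hp hpk => hnd.1 (hpk ▸ List.mem_map_of_mem hp)) (g v c)
    · simp only [List.foldl_cons, if_neg hk, beq_eq_false_iff_ne.mpr hk, Bool.false_eq_true, if_false]
      exact ih hnd.2 c

-- ===== VERDICT (by name: the statement is the Claim_ definition above) =====
theorem customize_card_spec : Claim_equal_customize_card := by
  intro card deck_meta _dom hpre
  unfold Spec_customize_card customize_card customize_card_alt Pre_customize_card preCheck_customize at *
  cases hcode : (PySem.Dict.mk card).get? "code" with
  | none => simp [hcode] at hpre
  | some code =>
    simp only [hcode] at hpre ⊢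
    by_cases h1 : code = "09021"
    · subst h1
      simp at hpre ⊢
      by_cases hany : (deck_meta.any (fun p => p.1 == "09021")) = true
      · have hcs := PySem.Dict.contains_eq_isSome_get? (PySem.Dict.mk deck_meta) "09021"
        cases hm : (PySem.Dict.mk deck_meta).get? "09021" with
        | none =>
          rw [hm] at hcs
          simp only [PySem.Dict.contains, hany, Option.isSome_none] at hcs
          cases hcs
        | some m =>
          rw [if_pos ⟨Or.inl rfl, hany⟩]
          have hgd : (PySem.Dict.mk deck_meta).getD "09021" [] = m :=
            PySem.Dict.getD_of_get?_eq_some _ [] hm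
          simp only [applyFirstRule, customizeRulesB, hgd, Option.getD_some]
          rw [hm] at hpre
          have hnd : (m.map Prod.fst).Nodup := by
            by_contra hh
            simp [hh] at hpre
          have hfun : (fun (c : PySem.Dict String String) (p : String × List (String × String)) =>
              if p.1 = "0" ∧ (PySem.Dict.mk p.2).getD "xp" "" = "1" then c.insert "real_slot" "Arcane" else c)
              = (fun c p => if p.1 = "0" then
                  (if (PySem.Dict.mk p.2).getD "xp" "" = "1" then PySem.Dict.insert c "real_slot" "Arcane" else c) else c) := by
            funext c p
            by_cases h : p.1 = "0" <;> simp [h]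
          rw [hfun, foldl_key "0"
            (fun u (c : PySem.Dict String String) => if (PySem.Dict.mk u).getD "xp" "" = "1" then PySem.Dict.insert c "real_slot" "Arcane" else c) m hnd]
          cases hu : (PySem.Dict.mk m).get? "0" with
          | none =>
            have hcb := PySem.Dict.contains_eq_isSome_get? (PySem.Dict.mk m) "0"
            rw [hu] at hcb
            simp only [PySem.Dict.contains_mk, Option.isSome_none] at hcb
            simp [hcb]
          | some u =>
            have hcb := PySem.Dict.contains_eq_isSome_get? (PySem.Dict.mk m) "0"
            rw [hu] at hcb
            simp only [PySem.Dict.contains_mk, Option.isSome_some] at hcb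
            have hgu : (PySem.Dict.mk m).getD "0" [] = u := PySem.Dict.getD_of_get?_eq_some _ [] hu
            by_cases hxp : (PySem.Dict.mk u).getD "xp" "" = "1" <;>
              simp [hcb, hgu, hxp, hany]
      · have h0 : (deck_meta.any fun p => p.1 == "09021") = false := Bool.eq_false_iff.mpr hany
        rw [if_neg (by simp [h0])]
        simp [applyFirstRule, customizeRulesB, h0]
    · by_cases h2 : code = "09079"
      · subst h2
        simp at hpre ⊢
        by_cases hany : (deck_meta.any (fun p => p.1 == "09079")) = true
        · have hcs := PySem.Dict.contains_eq_isSome_get? (PySem.Dict.mk deck_meta) "09079"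
          cases hm : (PySem.Dict.mk deck_meta).get? "09079" with
          | none =>
            rw [hm] at hcs
            simp only [PySem.Dict.contains, hany, Option.isSome_none] at hcs
            cases hcs
          | some m =>
            rw [if_pos ⟨Or.inr (Or.inl rfl), hany⟩]
            have hgd : (PySem.Dict.mk deck_meta).getD "09079" [] = m :=
              PySem.Dict.getD_of_get?_eq_some _ [] hm
            simp only [applyFirstRule, customizeRulesB, hgd, Option.getD_some]
            rw [hm] at hpre
            have hnd : (m.map Prod.fst).Nodup := by
              by_contra hh
              simp [hh] at hpre
            have hfun : (fun (c : PySem.Dict String String) (p : String × List (String × String)) =>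
                if p.1 = "3" ∧ (PySem.Dict.mk p.2).getD "xp" "" = "2" then c.insert "real_slot" "Arcane" else c)
                = (fun c p => if p.1 = "3" then
                    (if (PySem.Dict.mk p.2).getD "xp" "" = "2" then PySem.Dict.insert c "real_slot" "Arcane" else c) else c) := by
              funext c p
              by_cases h : p.1 = "3" <;> simp [h]
            rw [hfun, foldl_key "3"
              (fun u (c : PySem.Dict String String) => if (PySem.Dict.mk u).getD "xp" "" = "2" then PySem.Dict.insert c "real_slot" "Arcane" else c) m hnd]
            cases hu : (PySem.Dict.mk m).get? "3" with
            | none =>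
              have hcb := PySem.Dict.contains_eq_isSome_get? (PySem.Dict.mk m) "3"
              rw [hu] at hcb
              simp only [PySem.Dict.contains_mk, Option.isSome_none] at hcb
              simp [hcb]
            | some u =>
              have hcb := PySem.Dict.contains_eq_isSome_get? (PySem.Dict.mk m) "3"
              rw [hu] at hcb
              simp only [PySem.Dict.contains_mk, Option.isSome_some] at hcb
              have hgu : (PySem.Dict.mk m).getD "3" [] = u := PySem.Dict.getD_of_get?_eq_some _ [] hu
              by_cases hxp : (PySem.Dict.mk u).getD "xp" "" = "2" <;>
                simp [hcb, hgu, hxp, hany]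
        · have h0 : (deck_meta.any fun p => p.1 == "09079") = false := Bool.eq_false_iff.mpr hany
          rw [if_neg (by simp [h0])]
          simp [applyFirstRule, customizeRulesB, h0]
      · by_cases h3 : code = "09080"
        · subst h3
          simp at hpre ⊢
          by_cases hany : (deck_meta.any (fun p => p.1 == "09080")) = true
          · have hcs := PySem.Dict.contains_eq_isSome_get? (PySem.Dict.mk deck_meta) "09080"
            cases hm : (PySem.Dict.mk deck_meta).get? "09080" with
            | none =>
              rw [hm] at hcs
              simp only [PySem.Dict.contains, hany, Option.isSome_none] at hcs
              cases hcs
            | some m =>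
              rw [if_pos ⟨Or.inr (Or.inr rfl), hany⟩]
              have hgd : (PySem.Dict.mk deck_meta).getD "09080" [] = m :=
                PySem.Dict.getD_of_get?_eq_some _ [] hm
              simp only [applyFirstRule, customizeRulesB, hgd, Option.getD_some]
              rw [hm] at hpre
              have hnd : (m.map Prod.fst).Nodup := by
                by_contra hh
                simp [hh] at hpre
              have hfun : (fun (c : PySem.Dict String String) (p : String × List (String × String)) =>
                  if p.1 = "5" ∧ (PySem.Dict.mk p.2).getD "xp" "" = "2" then
                    if (PySem.Dict.mk p.2).getD "info" "" = "0" then c.insert "real_slot" "Arcane"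
                    else if (PySem.Dict.mk p.2).getD "info" "" = "1" then c.insert "real_slot" "Ally" else c
                  else c)
                  = (fun c p => if p.1 = "5" then
                      (if (PySem.Dict.mk p.2).getD "xp" "" = "2" then
                        (if (PySem.Dict.mk p.2).getD "info" "" = "0" then PySem.Dict.insert c "real_slot" "Arcane"
                         else if (PySem.Dict.mk p.2).getD "info" "" = "1" then PySem.Dict.insert c "real_slot" "Ally" else c)
                       else c) else c) := by
                funext c p
                by_cases h : p.1 = "5" <;> simp [h]
              rw [hfun, foldl_key "5"
                (fun u (c : PySem.Dict String String) =>
                  if (PySem.Dict.mk u).getD "xp" "" = "2" then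
                    (if (PySem.Dict.mk u).getD "info" "" = "0" then PySem.Dict.insert c "real_slot" "Arcane"
                     else if (PySem.Dict.mk u).getD "info" "" = "1" then PySem.Dict.insert c "real_slot" "Ally" else c)
                  else c) m hnd]
              cases hu : (PySem.Dict.mk m).get? "5" with
              | none =>
                have hcb := PySem.Dict.contains_eq_isSome_get? (PySem.Dict.mk m) "5"
                rw [hu] at hcb
                simp only [PySem.Dict.contains_mk, Option.isSome_none] at hcb
                simp [hcb]
              | some u =>
                have hcb := PySem.Dict.contains_eq_isSome_get? (PySem.Dict.mk m) "5"
                rw [hu] at hcb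
                simp only [PySem.Dict.contains_mk, Option.isSome_some] at hcb
                have hgu : (PySem.Dict.mk m).getD "5" [] = u := PySem.Dict.getD_of_get?_eq_some _ [] hu
                by_cases hxp : (PySem.Dict.mk u).getD "xp" "" = "2"
                · by_cases hi0 : (PySem.Dict.mk u).getD "info" "" = "0"
                  · simp [hcb, hgu, hxp, hi0, hany]
                  · by_cases hi1 : (PySem.Dict.mk u).getD "info" "" = "1" <;>
                      simp [hcb, hgu, hxp, hi0, hi1, hany]
                · simp [hcb, hgu, hxp, hany]
          · have h0 : (deck_meta.any fun p => p.1 == "09080") = false := Bool.eq_false_iff.mpr hany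
            rw [if_neg (by simp [h0])]
            simp [applyFirstRule, customizeRulesB, h0]
        · rw [if_neg (by tauto)]
          simp [applyFirstRule, customizeRulesB, h1, h2, h3]
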